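-- pv_equiv track=rewrite | github.com/nens/bro-connector | bro_connector/tools/utils.py | has_necessary_helper_files
-- ===== SOURCE A (Python) =====
-- def has_necessary_helper_files(filenames):
--     """
--     Check if the list of filenames contains exactly one file
--     for each of the required shapefile extensions.
--     """
--     required_extensions = [".dbf", ".prj", ".shx"]
--
--     # Count occurrences of each required extension
--     counts = {ext: 0 for ext in required_extensions}
--     for f in filenames:
--         ext = f.lower()[-4:]
--         if ext in counts:
--             counts[ext] += 1
--
--     # Check conditions
--     all_present = all(counts[ext] == 1 for ext in required_extensions)
--     return all_present, counts
-- ===== SOURCE B (Python) =====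
-- def has_necessary_helper_files(filenames):
--     """
--     Check if the list of filenames contains exactly one file
--     for each of the required shapefile extensions.
--     """
--     required_extensions = [".dbf", ".prj", ".shx"]
--
--     # One independent scan per required extension instead of a single
--     # accumulator loop with membership tests.
--     counts = {ext: len([f for f in filenames if f.lower()[-4:] == ext])
--               for ext in required_extensions}
--
--     all_present = all(counts[ext] == 1 for ext in required_extensions)
--     return all_present, counts
-- ===== Notes on version B (the rewrite author's own statement) =====
-- stated objective: alternative
-- what changed: Replaces the single-pass dict accumulator with an `in counts` guard by a dict comprehension that counts each required extension with its own independent filter scan over the filenames.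
import Mathlib
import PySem

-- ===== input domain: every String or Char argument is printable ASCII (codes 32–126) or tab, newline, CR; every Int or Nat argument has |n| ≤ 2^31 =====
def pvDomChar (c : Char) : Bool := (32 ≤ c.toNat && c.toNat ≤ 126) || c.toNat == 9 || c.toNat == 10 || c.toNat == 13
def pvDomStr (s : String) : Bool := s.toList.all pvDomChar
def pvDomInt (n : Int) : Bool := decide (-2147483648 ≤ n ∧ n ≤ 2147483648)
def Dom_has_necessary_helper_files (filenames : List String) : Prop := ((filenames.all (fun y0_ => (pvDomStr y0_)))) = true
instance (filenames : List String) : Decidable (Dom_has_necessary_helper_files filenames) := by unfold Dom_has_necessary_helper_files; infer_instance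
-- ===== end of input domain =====

-- B replaces A's single accumulator loop (with an `in counts` membership guard)
-- by one independent filter scan per required extension (objective: alternative).


-- ===== PORT A =====
-- f.lower()[-4:]
def pvExtOf (f : String) : String := PySem.Str.slice (PySem.Str.lower f) (some (-4)) none

def has_necessary_helper_files (filenames : List String) : Bool × (List (String × Int)) :=
  let required_extensions : List String := [".dbf", ".prj", ".shx"]
  -- counts = {ext: 0 for ext in required_extensions}
  let counts0 : PySem.Dict String Int :=
    PySem.Dict.ofList (required_extensions.map (fun ext => (ext, 0)))
  -- for f in filenames: if ext in counts: counts[ext] += 1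
  let counts := filenames.foldl (fun d f =>
    let ext := pvExtOf f
    if d.contains ext then d.modify ext 0 (· + 1) else d) counts0
  -- counts[ext] ported as getD (every required ext is a key of counts)
  let all_present := required_extensions.all (fun ext => counts.getD ext 0 == 1)
  (all_present, counts.items)

-- ===== PORT B =====
def has_necessary_helper_files_alt (filenames : List String) : Bool × (List (String × Int)) :=
  let required_extensions : List String := [".dbf", ".prj", ".shx"]
  -- {ext: len([f for f in filenames if f.lower()[-4:] == ext]) for ext in required_extensions}
  -- keys are literal and distinct, so the dict IS this association list
  let counts : List (String × Int) :=
    required_extensions.map (fun ext =>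
      (ext, ((filenames.filter (fun f => pvExtOf f == ext)).length : Int)))
  let all_present := required_extensions.all (fun ext => (counts.lookup ext).getD 0 == 1)
  (all_present, counts)

-- ===== PRECONDITION & SPEC =====
def Spec_has_necessary_helper_files (filenames : List String) (out : Bool × (List (String × Int))) : Prop := out = has_necessary_helper_files_alt filenames
instance (filenames : List String) (out : Bool × (List (String × Int))) : Decidable (Spec_has_necessary_helper_files filenames out) := by unfold Spec_has_necessary_helper_files; infer_instance

-- ===== CLAIM (what is proved, stated in full; the proofs are below) =====
def Claim_equal_has_necessary_helper_files : Prop := ∀ (filenames : List String), Dom_has_necessary_helper_files filenames → Spec_has_necessary_helper_files filenames (has_necessary_helper_files filenames)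

-- ===== LEMMAS AND PROOFS =====

-- the loop body of A
def pvStep (d : PySem.Dict String Int) (f : String) : PySem.Dict String Int :=
  if d.contains (pvExtOf f) then d.modify (pvExtOf f) 0 (· + 1) else d

lemma pvFold_keys (fs : List String) (d : PySem.Dict String Int) :
    (fs.foldl pvStep d).keys = d.keys := by
  induction fs generalizing d with
  | nil => rfl
  | cons f fs ih =>
      simp only [List.foldl_cons]
      rw [ih]
      unfold pvStep
      by_cases hc : d.contains (pvExtOf f) = true
      · rw [if_pos hc, PySem.Dict.keys_modify,
            PySem.Dict.keys_insert_of_contains _ _ hc]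
      · rw [if_neg hc]

lemma pvFold_getD (fs : List String) (d : PySem.Dict String Int) (e : String)
    (he : d.contains e = true) :
    (fs.foldl pvStep d).getD e 0
      = d.getD e 0 + ((fs.filter (fun f => pvExtOf f == e)).length : Int) := by
  induction fs generalizing d with
  | nil => simp
  | cons f fs ih =>
      simp only [List.foldl_cons, List.filter_cons]
      by_cases hfe : pvExtOf f = e
      · have hstep : pvStep d f = d.modify e 0 (· + 1) := by
          unfold pvStep; rw [hfe, if_pos he]
        rw [hstep, ih _ (by simp [PySem.Dict.contains_modify, he]),
            PySem.Dict.getD_modify_self]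
        simp [hfe]

        ring
      · have hstep : (pvStep d f).getD e 0 = d.getD e 0 := by
          unfold pvStep
          split
          · exact PySem.Dict.getD_modify_of_ne d 0 _ (Ne.symm hfe)
          · rfl
        have hcont : (pvStep d f).contains e = true := by
          unfold pvStep
          split
          · simp [PySem.Dict.contains_modify, he]
          · exact he
        rw [ih _ hcont, hstep]
        simp [hfe]

theorem has_necessary_helper_files_spec : Claim_equal_has_necessary_helper_files := by
  unfold Claim_equal_has_necessary_helper_files
  intro filenames _
  unfold Spec_has_necessary_helper_files has_necessary_helper_files has_necessary_helper_files_alt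
  simp only []
  set d0 : PySem.Dict String Int :=
    PySem.Dict.ofList ([".dbf", ".prj", ".shx"].map (fun ext => (ext, (0 : Int)))) with hd0
  have hfold : List.foldl (fun (d : PySem.Dict String Int) (f : String) =>
      if d.contains (pvExtOf f) = true then d.modify (pvExtOf f) 0 (· + 1) else d) d0 filenames
      = List.foldl pvStep d0 filenames := rfl
  rw [hfold]
  have hkeys : (List.foldl pvStep d0 filenames).keys = [".dbf", ".prj", ".shx"] := by
    rw [pvFold_keys]; decide
  have hget : ∀ e : String, d0.contains e = true →
      (List.foldl pvStep d0 filenames).getD e 0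
        = d0.getD e 0 + ((filenames.filter (fun f => pvExtOf f == e)).length : Int) :=
    fun e he => pvFold_getD filenames d0 e he
  have hdbf := hget ".dbf" (by decide)
  have hprj := hget ".prj" (by decide)
  have hshx := hget ".shx" (by decide)
  rw [show d0.getD ".dbf" 0 = 0 from by decide, zero_add] at hdbf
  rw [show d0.getD ".prj" 0 = 0 from by decide, zero_add] at hprj
  rw [show d0.getD ".shx" 0 = 0 from by decide, zero_add] at hshx
  have hitems : (List.foldl pvStep d0 filenames).items
      = [".dbf", ".prj", ".shx"].map (fun k => (k, (List.foldl pvStep d0 filenames).getD k 0)) := by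
    rw [← hkeys]
    exact PySem.Dict.items_eq_map_keys _ (by rw [hkeys]; decide) 0
  refine Prod.ext ?_ ?_
  · simp only [List.all_cons, List.all_nil, List.map_cons, List.map_nil]
    rw [hdbf, hprj, hshx]
    simp [List.lookup]
  · simp only []
    rw [hitems]
    simp only [List.map_cons, List.map_nil]
    rw [hdbf, hprj, hshx]
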